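-- pv_equiv track=rewrite | github.com/testalucida/python | ImmoControlCenter/business.py | _isIntOrFloatFormat
-- ===== SOURCE A (Python) =====
-- def _isIntOrFloatFormat( val:str ) -> bool:
--     points = 0
--     minus = 0
--     for c in val:
--         if not c.isdigit():
--             if c == ".":
--                 points = points + 1
--                 if points > 1: return False
--             elif c == "-":
--                 minus = minus + 1
--                 if minus > 1: return False
--             else:
--                 return False
--     return True
-- ===== SOURCE B (Python) =====
-- def _isIntOrFloatFormat( val:str ) -> bool:
--     return (all(c.isdigit() or c in ".-" for c in val)
--             and val.count(".") <= 1
--             and val.count("-") <= 1)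
-- ===== Notes on version B (the rewrite author's own statement) =====
-- stated objective: simpler
-- what changed: Replaced the fused single loop with mutable counters and early returns by three declarative passes: an allowed-character test plus two count() checks, combined with a conjunction.
import Mathlib
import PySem

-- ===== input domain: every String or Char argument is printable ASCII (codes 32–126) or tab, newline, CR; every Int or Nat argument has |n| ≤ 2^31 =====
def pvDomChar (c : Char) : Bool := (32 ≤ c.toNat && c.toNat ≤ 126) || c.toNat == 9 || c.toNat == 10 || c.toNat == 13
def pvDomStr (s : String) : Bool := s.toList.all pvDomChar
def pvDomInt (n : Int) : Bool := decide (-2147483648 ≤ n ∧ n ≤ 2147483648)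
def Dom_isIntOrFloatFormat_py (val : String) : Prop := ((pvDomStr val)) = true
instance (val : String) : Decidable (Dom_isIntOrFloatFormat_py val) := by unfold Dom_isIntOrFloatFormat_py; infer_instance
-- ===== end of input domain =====

-- B replaces A's fused counter loop by three separate declarative passes (allowed chars, count '.', count '-'); simpler, same cost.

-- ===== PORT A =====
-- loop over the characters carrying the two counters, with early returns
def isIntOrFloatFormat_py_go : List Char → Nat → Nat → Bool
  | [], _, _ => true
  | c :: cs, points, minus =>
    if !(PySem.Chars.isdigit c) then
      if c = '.' then
        if points + 1 > 1 then false else isIntOrFloatFormat_py_go cs (points + 1) minus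
      else if c = '-' then
        if minus + 1 > 1 then false else isIntOrFloatFormat_py_go cs points (minus + 1)
      else false
    else isIntOrFloatFormat_py_go cs points minus

def isIntOrFloatFormat_py (val : String) : Bool :=
  isIntOrFloatFormat_py_go val.toList 0 0

-- ===== PORT B =====
def isIntOrFloatFormat_py_alt (val : String) : Bool :=
  (val.toList.all (fun c => PySem.Chars.isdigit c || c = '.' || c = '-'))
    && decide (val.toList.count '.' ≤ 1)
    && decide (val.toList.count '-' ≤ 1)

-- ===== PRECONDITION & SPEC =====
def Spec_isIntOrFloatFormat_py (val : String) (out : Bool) : Prop := out = isIntOrFloatFormat_py_alt val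
instance (val : String) (out : Bool) : Decidable (Spec_isIntOrFloatFormat_py val out) := by unfold Spec_isIntOrFloatFormat_py; infer_instance

-- ===== CLAIM (what is proved, stated in full; the proofs are below) =====
def Claim_equal_isIntOrFloatFormat_py : Prop := ∀ (val : String), Dom_isIntOrFloatFormat_py val → Spec_isIntOrFloatFormat_py val (isIntOrFloatFormat_py val)

-- ===== LEMMAS AND PROOFS =====

-- Loop invariant: the counter loop returns true iff all chars are allowed and
-- each separator count, offset by the counter already accumulated, stays ≤ 1.
theorem isIntOrFloatFormat_py_go_eq (cs : List Char) : ∀ (p m : Nat), p ≤ 1 → m ≤ 1 →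
    isIntOrFloatFormat_py_go cs p m =
      ((cs.all (fun c => PySem.Chars.isdigit c || c = '.' || c = '-'))
        && decide (cs.count '.' + p ≤ 1)
        && decide (cs.count '-' + m ≤ 1)) := by
  induction cs with
  | nil => intro p m hp hm; simp [isIntOrFloatFormat_py_go, hp, hm]
  | cons c cs ih =>
    intro p m hple hmle
    by_cases hd : PySem.Chars.isdigit c = true
    · have hdot : c ≠ '.' := by
        intro h; subst h; revert hd; decide
      have hmin : c ≠ '-' := by
        intro h; subst h; revert hd; decide
      simp [isIntOrFloatFormat_py_go, hd, ih p m hple hmle, hdot, hmin]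
    · by_cases h1 : c = '.'
      · subst h1
        by_cases hp : p + 1 > 1
        · simp [isIntOrFloatFormat_py_go, hd, hp]
          omega
        · have e : List.count '.' cs + 1 + p = List.count '.' cs + (p + 1) := by omega
          simp [isIntOrFloatFormat_py_go, hd, hp, ih (p + 1) m (by omega) hmle, e]
      · by_cases h2 : c = '-'
        · subst h2
          by_cases hm : m + 1 > 1
          · simp [isIntOrFloatFormat_py_go, hd, hm]
            omega
          · have e : List.count '-' cs + 1 + m = List.count '-' cs + (m + 1) := by omega
            simp [isIntOrFloatFormat_py_go, hd, hm, ih p (m + 1) hple (by omega), h1, e]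
        · simp [isIntOrFloatFormat_py_go, hd, h1, h2]

-- ===== VERDICT (by name: the statement is the Claim_ definition above) =====
theorem isIntOrFloatFormat_py_spec : Claim_equal_isIntOrFloatFormat_py := by
  intro val _
  unfold Spec_isIntOrFloatFormat_py isIntOrFloatFormat_py isIntOrFloatFormat_py_alt
  rw [isIntOrFloatFormat_py_go_eq _ 0 0 (by omega) (by omega)]
  simp
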